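-- pv_equiv track=rewrite | github.com/juanpac96/GibdetColombiaChapter_UrbanTreeObservatory | scripts/explore_csv_data.py | extract_unique_values
-- ===== SOURCE A (Python) =====
-- from collections import defaultdict, Counter
--
-- def extract_unique_values(data, fields):
--     """Extract unique values for specified fields in the data."""
--     result = {}
--     for field in fields:
--         values = [row.get(field, '').strip() for row in data if row.get(field)]
--         # Remove empty values
--         values = [v for v in values if v]
--         # Count occurrences of each value
--         value_counts = Counter(values)
--         # Sort by frequency (most common first)
--         sorted_values = sorted(value_counts.items(), key=lambda x: (-x[1], x[0]))
--         result[field] = sorted_values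
--     return result
-- ===== SOURCE B (Python) =====
-- def _ranked(values):
--     """Rank values by frequency without Counter: sort lexicographically, run-length
--     encode consecutive runs, then bucket the runs by count and emit buckets in
--     descending count order (each bucket is already in ascending value order)."""
--     vals = sorted(values)
--     groups = []                      # (value, count), values strictly ascending
--     i, n = 0, len(vals)
--     while i < n:
--         j = i
--         while j < n and vals[j] == vals[i]:
--             j += 1
--         groups.append((vals[i], j - i))
--         i = j
--     buckets = {}                     # count -> runs with that count, ascending values
--     for v, c in groups:
--         buckets.setdefault(c, []).append((v, c))
--     return [pair for c in sorted(buckets, reverse=True) for pair in buckets[c]]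
--
--
-- def extract_unique_values(data, fields):
--     """Extract unique values for specified fields in the data."""
--     return {field: _ranked(s for s in (row.get(field, '').strip()
--                                        for row in data if row.get(field)) if s)
--             for field in fields}
-- ===== Notes on version B (the rewrite author's own statement) =====
-- stated objective: alternative
-- what changed: B replaces Counter plus a comparator sort by (-count, value) with a different ranking algorithm: sort the values lexicographically, run-length encode consecutive runs to get (value, count) pairs, bucket the runs by count, and emit buckets in descending count order.
import Mathlib
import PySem

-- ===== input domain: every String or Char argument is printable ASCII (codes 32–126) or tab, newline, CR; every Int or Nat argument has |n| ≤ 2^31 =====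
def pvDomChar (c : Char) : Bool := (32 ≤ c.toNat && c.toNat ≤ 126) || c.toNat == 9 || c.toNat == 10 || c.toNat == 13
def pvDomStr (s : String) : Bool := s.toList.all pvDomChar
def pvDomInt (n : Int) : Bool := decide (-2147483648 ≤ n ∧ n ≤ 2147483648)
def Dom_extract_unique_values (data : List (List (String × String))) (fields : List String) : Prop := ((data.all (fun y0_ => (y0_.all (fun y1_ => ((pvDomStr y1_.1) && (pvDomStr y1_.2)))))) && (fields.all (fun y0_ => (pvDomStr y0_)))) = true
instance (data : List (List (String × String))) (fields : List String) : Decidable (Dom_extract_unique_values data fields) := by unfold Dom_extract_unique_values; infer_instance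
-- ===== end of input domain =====

-- B ranks each field's values without Counter and without a (-count, value) comparator sort:
-- it sorts the values lexicographically, run-length encodes consecutive runs, buckets the
-- runs by count and emits the buckets in descending count order (alternative algorithm,
-- same return value; no speed claim).

-- ===== PORT A =====
def extract_unique_values (data : List (List (String × String))) (fields : List String) : List (String × List (String × Int)) :=
  (fields.foldl (fun (result : PySem.Dict String (List (String × Int))) field =>
      let values : List String :=
        (data.filter (fun row => ((PySem.Dict.mk row).get? field).getD "" ≠ "")).map
          (fun row => PySem.Str.strip (((PySem.Dict.mk row).get? field).getD ""))
      let values := values.filter (fun v => v ≠ "")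
      let value_counts := PySem.Dict.counter values
      let sorted_values := PySem.List.sorted2 value_counts.items (fun x => -x.2) (fun x => x.1)
      result.insert field sorted_values)
    PySem.Dict.empty).items

-- ===== PORT B =====
-- the while loop of _ranked: the inner 'while j < n and vals[j] == vals[i]' scan of the run
-- after position i is takeWhile/dropWhile on the rest of the list; j - i = 1 + run length
def pvRuns : List String → List (String × Int)
  | [] => []
  | v :: rest =>
    (v, (1 + ((rest.takeWhile (fun w => w == v)).length : Int))) ::
      pvRuns (rest.dropWhile (fun w => w == v))
termination_by l => l.length
decreasing_by
  simp only [List.length_cons]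
  exact Nat.lt_succ_of_le (List.length_dropWhile_le _ _)

def pvRanked (values : List String) : List (String × Int) :=
  let vals := PySem.List.sorted values (fun x => x) false
  let groups := pvRuns vals
  let buckets : PySem.Dict Int (List (String × Int)) :=
    groups.foldl (fun b p => b.modify p.2 [] (· ++ [p])) PySem.Dict.empty
  (PySem.List.sorted buckets.keys (fun x => x) true).flatMap (fun c => buckets.getD c [])

def extract_unique_values_alt (data : List (List (String × String))) (fields : List String) : List (String × List (String × Int)) :=
  (fields.foldl (fun (result : PySem.Dict String (List (String × Int))) field =>
      result.insert field (pvRanked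
        (((data.filter (fun row => ((PySem.Dict.mk row).get? field).getD "" ≠ "")).map
            (fun row => PySem.Str.strip (((PySem.Dict.mk row).get? field).getD ""))).filter
          (fun v => v ≠ ""))))
    PySem.Dict.empty).items

-- ===== PRECONDITION & SPEC =====
def Spec_extract_unique_values (data : List (List (String × String))) (fields : List String) (out : List (String × List (String × Int))) : Prop := out = extract_unique_values_alt data fields
instance (data : List (List (String × String))) (fields : List String) (out : List (String × List (String × Int))) : Decidable (Spec_extract_unique_values data fields out) := by unfold Spec_extract_unique_values; infer_instance

-- ===== CLAIM (what is proved, stated in full; the proofs are below) =====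
def Claim_equal_extract_unique_values : Prop := ∀ (data : List (List (String × String))) (fields : List String), Dom_extract_unique_values data fields → Spec_extract_unique_values data fields (extract_unique_values data fields)

-- ===== LEMMAS AND PROOFS =====

-- the Boolean "before" relation sorted2 uses for the key pair (-x.2, x.1): a strict lex order
def pvB (p q : String × Int) : Bool :=
  decide (-p.2 < -q.2) || (!decide (-q.2 < -p.2) && decide (p.1 < q.1))

theorem pvB_iff (p q : String × Int) :
    pvB p q = true ↔ (-p.2 < -q.2 ∨ (p.2 = q.2 ∧ p.1 < q.1)) := by
  unfold pvB
  by_cases h1 : -p.2 < -q.2 <;> by_cases h2 : -q.2 < -p.2 <;>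
    simp [h1, h2] <;> omega

theorem pvB_asymm {p q : String × Int} (h : pvB p q = true) : pvB q p = false := by
  by_contra hc
  have hqp : pvB q p = true := by revert hc; cases pvB q p <;> simp
  rcases (pvB_iff p q).mp h with h' | h' <;> rcases (pvB_iff q p).mp hqp with h'' | h''
  · omega
  · omega
  · omega
  · exact absurd (lt_trans h'.2 h''.2) (lt_irrefl _)

theorem pvB_trans {p q r : String × Int} (h1 : pvB p q = true) (h2 : pvB q r = true) :
    pvB p r = true := by
  rcases (pvB_iff p q).mp h1 with ha | ha <;> rcases (pvB_iff q r).mp h2 with hb | hb <;>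
    apply (pvB_iff p r).mpr
  · exact Or.inl (lt_trans ha hb)
  · exact Or.inl (by omega)
  · exact Or.inl (by omega)
  · exact Or.inr ⟨ha.1.trans hb.1, lt_trans ha.2 hb.2⟩

theorem pvB_antisymm {p q : String × Int} (h1 : pvB p q = false) (h2 : pvB q p = false) :
    p = q := by
  have e1 : ¬ (-p.2 < -q.2 ∨ (p.2 = q.2 ∧ p.1 < q.1)) := by
    rw [← pvB_iff]; simp [h1]
  have e2 : ¬ (-q.2 < -p.2 ∨ (q.2 = p.2 ∧ q.1 < p.1)) := by
    rw [← pvB_iff]; simp [h2]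
  push Not at e1 e2
  have hsnd : p.2 = q.2 := by omega
  have hfst : p.1 = q.1 := le_antisymm
    (le_of_not_gt fun h => (e2.2 hsnd.symm) h)
    (le_of_not_gt fun h => (e1.2 hsnd) h)
  exact Prod.ext hfst hsnd

-- quasi-sortedness (Pairwise "not before the other way") is preserved by insertBy pvB
theorem insertBy_pvB_pairwise (x : String × Int) (l : List (String × Int))
    (h : l.Pairwise (fun a b => pvB b a = false)) :
    (PySem.List.insertBy pvB x l).Pairwise (fun a b => pvB b a = false) := by
  induction l with
  | nil => simp [PySem.List.insertBy]
  | cons y ys ih =>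
    rw [List.pairwise_cons] at h
    by_cases hxy : pvB x y = true
    · rw [show PySem.List.insertBy pvB x (y :: ys) = x :: y :: ys by
        simp [PySem.List.insertBy, hxy]]
      refine List.pairwise_cons.mpr ⟨?_, List.pairwise_cons.mpr ⟨h.1, h.2⟩⟩
      intro z hz
      rcases List.mem_cons.mp hz with rfl | hz'
      · exact pvB_asymm hxy
      · by_contra hc
        have hzx : pvB z x = true := by revert hc; cases pvB z x <;> simp
        have hzy := pvB_trans hzx hxy
        rw [h.1 z hz'] at hzy
        exact absurd hzy (by simp)
    · have hxy' : pvB x y = false := by revert hxy; cases pvB x y <;> simp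
      rw [show PySem.List.insertBy pvB x (y :: ys) = y :: PySem.List.insertBy pvB x ys by
        simp [PySem.List.insertBy, hxy']]
      refine List.pairwise_cons.mpr ⟨?_, ih h.2⟩
      intro z hz
      rcases (PySem.List.insertBy_mem_iff _ _ _ _).mp hz with rfl | hz'
      · exact hxy'
      · exact h.1 z hz'

theorem foldl_insertBy_pvB_pairwise (xs : List (String × Int)) (acc : List (String × Int))
    (h : acc.Pairwise (fun a b => pvB b a = false)) :
    (xs.foldl (fun acc x => PySem.List.insertBy pvB x acc) acc).Pairwise
      (fun a b => pvB b a = false) := by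
  induction xs generalizing acc with
  | nil => exact h
  | cons x xs ih => exact ih _ (insertBy_pvB_pairwise x acc h)

-- a permutation class has at most one quasi-sorted member (by pvB_antisymm)
theorem pv_unique (xs : List (String × Int)) : ∀ (ys : List (String × Int)), xs.Perm ys →
    xs.Pairwise (fun a b => pvB b a = false) →
    ys.Pairwise (fun a b => pvB b a = false) → xs = ys := by
  induction xs with
  | nil =>
    intro ys hperm _ _
    exact (List.Perm.nil_eq hperm).symm ▸ rfl
  | cons a xs ih =>
    intro ys hperm hx hy
    cases ys with
    | nil => exact absurd hperm (by simp)
    | cons b ys =>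
      rw [List.pairwise_cons] at hx hy
      have hab : a = b := by
        by_cases h : a = b
        · exact h
        · have haim : a ∈ b :: ys := hperm.mem_iff.mp (List.mem_cons_self ..)
          have hbim : b ∈ a :: xs := hperm.symm.mem_iff.mp (List.mem_cons_self ..)
          have ha' : a ∈ ys := by
            rcases List.mem_cons.mp haim with h' | h'
            · exact absurd h' h
            · exact h'
          have hb' : b ∈ xs := by
            rcases List.mem_cons.mp hbim with h' | h'
            · exact absurd h' (fun e => h e.symm)
            · exact h'
          exact pvB_antisymm (hy.1 a ha') (hx.1 b hb')
      subst hab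
      exact congrArg (a :: ·) (ih ys hperm.cons_inv hx.2 hy.2)

-- sorted2 with keys (-x.2, x.1) IS the fold of insertBy pvB (definitional)
theorem sorted2_eq_foldl (xs : List (String × Int)) :
    PySem.List.sorted2 xs (fun x => -x.2) (fun x => x.1) false
      = xs.foldl (fun acc x => PySem.List.insertBy pvB x acc) [] := rfl

-- small congruence helpers
theorem pv_flatMap_congr {α β : Type} (l : List α) (f g : α → List β)
    (h : ∀ a ∈ l, f a = g a) : l.flatMap f = l.flatMap g := by
  induction l with
  | nil => rfl
  | cons a l ih =>
    simp only [List.flatMap_cons]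
    rw [h a (List.mem_cons_self ..), ih (fun a ha => h a (List.mem_cons_of_mem _ ha))]

theorem pv_foldl_congr {α β : Type} (f g : β → α → β) (l : List α) (b : β)
    (h : ∀ acc, ∀ x ∈ l, f acc x = g acc x) : l.foldl f b = l.foldl g b := by
  induction l generalizing b with
  | nil => rfl
  | cons x l ih =>
    simp only [List.foldl_cons]
    rw [h b x (List.mem_cons_self ..)]
    exact ih _ (fun acc y hy => h acc y (List.mem_cons_of_mem _ hy))

-- ---------- run-length encoding of a sorted list ----------

theorem pvRuns_sorted_spec (S : List String) (h : S.Pairwise (· ≤ ·)) :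
    pvRuns S = (PySem.Set.ofList S).map (fun v => (v, (List.count v S : Int)))
      ∧ (PySem.Set.ofList S).Pairwise (· < ·) := by
  induction S using pvRuns.induct with
  | case1 => simp [pvRuns]
  | case2 v rest ih =>
    rw [List.pairwise_cons] at h
    obtain ⟨hv, hrest⟩ := h
    have hsub := List.dropWhile_sublist (l := rest) (p := fun w => w == v)
    have htailpw : (rest.dropWhile (fun w => w == v)).Pairwise (· ≤ ·) :=
      List.Pairwise.sublist hsub hrest
    -- every element of the dropped tail is strictly greater than v
    have hgt : ∀ w ∈ rest.dropWhile (fun w => w == v), v < w := by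
      intro w hw
      rcases htl : rest.dropWhile (fun w => w == v) with _ | ⟨t0, ts⟩
      · rw [htl] at hw; simp at hw
      · rw [htl] at hw
        have hhd := List.head?_dropWhile_not (fun w => w == v) rest
        rw [htl] at hhd
        simp only [List.head?_cons] at hhd
        have ht0ne : ¬ (t0 = v) := by simpa using hhd
        have ht0mem : t0 ∈ rest := hsub.subset (htl ▸ List.mem_cons_self ..)
        have ht0 : v < t0 := lt_of_le_of_ne (hv t0 ht0mem) (fun e => ht0ne e.symm)
        rcases List.mem_cons.mp hw with rfl | hw'
        · exact ht0
        · have htp := htl ▸ htailpw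
          exact lt_of_lt_of_le ht0 ((List.pairwise_cons.mp htp).1 w hw')
    have hnm : v ∉ rest.dropWhile (fun w => w == v) := fun hw => lt_irrefl v (hgt v hw)
    have hrun : ∀ w ∈ rest.takeWhile (fun w => w == v), w = v := by
      intro w hw
      simpa using List.mem_takeWhile_imp hw
    have hsplit : rest.takeWhile (fun w => w == v) ++ rest.dropWhile (fun w => w == v)
        = rest := List.takeWhile_append_dropWhile
    obtain ⟨ih1, ih2⟩ := ih htailpw
    -- distinct values: ofList (v :: rest) = v :: ofList tail
    have hdiscard : ∀ (run : List String), (∀ w ∈ run, w = v) →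
        ((PySem.Set.ofList (run ++ rest.dropWhile (fun w => w == v))).discard v : List String)
          = (PySem.Set.ofList (rest.dropWhile (fun w => w == v))).discard v := by
      intro run
      induction run with
      | nil => intro _; rfl
      | cons w run ihr =>
        intro hall
        have hw : w = v := hall w (List.mem_cons_self ..)
        subst hw
        rw [List.cons_append, PySem.Set.ofList_cons]
        simp only [PySem.Set.discard, List.filter_cons, beq_self_eq_true, Bool.not_true]
        simp only [List.filter_filter]
        have : (fun y => !(y == w) && !(y == w)) = (fun y => !(y == w)) := by
          funext y; cases (y == w) <;> simp
        rw [this]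
        exact ihr (fun u hu => hall u (List.mem_cons_of_mem _ hu))
    have hdiscard2 : ((PySem.Set.ofList (rest.dropWhile (fun w => w == v))).discard v : List String)
        = PySem.Set.ofList (rest.dropWhile (fun w => w == v)) := by
      apply List.filter_eq_self.mpr
      intro w hw
      have : w ∈ rest.dropWhile (fun w => w == v) := (PySem.Set.mem_ofList _ _).mp hw
      have := hgt w this
      simp [ne_of_gt this]
    have hofl : (PySem.Set.ofList (v :: rest) : List String)
        = v :: PySem.Set.ofList (rest.dropWhile (fun w => w == v)) := by
      have hd := hdiscard (rest.takeWhile (fun w => w == v)) hrun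
      rw [hsplit] at hd
      rw [PySem.Set.ofList_cons, hd, hdiscard2]
    -- counts
    have hsplitcnt : ∀ u, List.count u rest
        = List.count u (rest.takeWhile (fun w => w == v))
          + List.count u (rest.dropWhile (fun w => w == v)) := by
      intro u
      have h0 := congrArg (List.count u) hsplit
      rw [List.count_append] at h0
      omega
    have hcntv : List.count v (v :: rest) = 1 + (rest.takeWhile (fun w => w == v)).length := by
      rw [List.count_cons_self]
      have h1 : List.count v (rest.takeWhile (fun w => w == v))
          = (rest.takeWhile (fun w => w == v)).length := by
        rw [List.count_eq_length]
        intro b hb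
        have := hrun b hb
        simp [this]
      have h2 : List.count v (rest.dropWhile (fun w => w == v)) = 0 :=
        List.count_eq_zero.mpr hnm
      have h0 := hsplitcnt v
      omega
    have hcntu : ∀ u ∈ rest.dropWhile (fun w => w == v),
        List.count u (v :: rest) = List.count u (rest.dropWhile (fun w => w == v)) := by
      intro u hu
      have hune : u ≠ v := ne_of_gt (hgt u hu)
      have hcc : List.count u (v :: rest) = List.count u rest := by
        simp [Ne.symm hune]
      have h1 : List.count u (rest.takeWhile (fun w => w == v)) = 0 := by
        apply List.count_eq_zero.mpr
        intro hu'
        exact hune (hrun u hu')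
      have h0 := hsplitcnt u
      omega
    constructor
    · rw [pvRuns, hofl, List.map_cons]
      congr 1
      · have : ((List.count v (v :: rest) : Nat) : Int)
            = 1 + ((rest.takeWhile (fun w => w == v)).length : Int) := by
          rw [hcntv]; push_cast; ring
        rw [this]
      · rw [ih1]
        apply List.map_congr_left
        intro u hu
        have hu' : u ∈ rest.dropWhile (fun w => w == v) := (PySem.Set.mem_ofList _ _).mp hu
        rw [hcntu u hu']
    · rw [hofl]
      refine List.pairwise_cons.mpr ⟨?_, ih2⟩
      intro w hw
      exact hgt w ((PySem.Set.mem_ofList _ _).mp hw)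

-- ---------- buckets ----------

theorem getD_bucket (l : List (String × Int)) (d : PySem.Dict Int (List (String × Int)))
    (c : Int) :
    (l.foldl (fun b p => b.modify p.2 [] (· ++ [p])) d).getD c []
      = d.getD c [] ++ l.filter (fun p => p.2 == c) := by
  induction l generalizing d with
  | nil => simp
  | cons p l ih =>
    simp only [List.foldl_cons, List.filter_cons]
    rw [ih]
    by_cases hc : p.2 = c
    · subst hc
      rw [PySem.Dict.getD_modify_self]
      simp
    · rw [PySem.Dict.getD_modify_of_ne _ _ _ (fun e => hc e.symm)]
      simp [hc]

theorem perm_flatMap_filter (C : List Int) : ∀ (l : List (String × Int)), C.Nodup →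
    (∀ p ∈ l, p.2 ∈ C) →
    (C.flatMap (fun c => l.filter (fun p => p.2 == c))).Perm l := by
  induction C with
  | nil =>
    intro l _ hcov
    cases l with
    | nil => simp
    | cons p l => exact absurd (hcov p (List.mem_cons_self ..)) (by simp)
  | cons c C ih =>
    intro l hC hcov
    simp only [List.flatMap_cons]
    have hrw : ∀ c' ∈ C, l.filter (fun p => p.2 == c')
        = (l.filter (fun p => !(p.2 == c))).filter (fun p => p.2 == c') := by
      intro c' hc'
      rw [List.filter_filter]
      apply List.filter_congr
      intro p _
      have hcc : c' ≠ c := fun e => (List.nodup_cons.mp hC).1 (e ▸ hc')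
      by_cases h : p.2 = c'
      · simp [h, hcc]
      · simp [h]
    have hmapeq : C.flatMap (fun c' => l.filter (fun p => p.2 == c'))
        = C.flatMap (fun c' => (l.filter (fun p => !(p.2 == c))).filter (fun p => p.2 == c')) :=
      pv_flatMap_congr _ _ _ hrw
    rw [hmapeq]
    have hcov' : ∀ p ∈ l.filter (fun p => !(p.2 == c)), p.2 ∈ C := by
      intro p hp
      have hpl := List.mem_filter.mp hp
      rcases List.mem_cons.mp (hcov p hpl.1) with h' | h'
      · exfalso
        have hb := hpl.2
        rw [h'] at hb
        simp at hb
      · exact h'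
    have ihh := ih (l.filter (fun p => !(p.2 == c))) (List.nodup_cons.mp hC).2 hcov'
    exact (ihh.append_left (l.filter (fun p => p.2 == c))).trans
      (List.filter_append_perm _ l)

theorem pairwise_out (C : List Int) (l : List (String × Int))
    (hl : l.Pairwise (fun p q => p.1 < q.1)) (hC : C.Pairwise (· > ·)) :
    (C.flatMap (fun c => l.filter (fun p => p.2 == c))).Pairwise
      (fun p q => pvB p q = true) := by
  induction C with
  | nil => simp
  | cons c C ih =>
    rw [List.pairwise_cons] at hC
    simp only [List.flatMap_cons]
    rw [List.pairwise_append]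
    refine ⟨?_, ih hC.2, ?_⟩
    · have hf := hl.filter (fun p => p.2 == c)
      apply List.Pairwise.imp_of_mem ?_ hf
      intro p q hp hq hlt
      have hpc : p.2 = c := by simpa using (List.mem_filter.mp hp).2
      have hqc : q.2 = c := by simpa using (List.mem_filter.mp hq).2
      exact (pvB_iff p q).mpr (Or.inr ⟨hpc.trans hqc.symm, hlt⟩)
    · intro p hp q hq
      have hpc : p.2 = c := by simpa using (List.mem_filter.mp hp).2
      rcases List.mem_flatMap.mp hq with ⟨c', hc', hq'⟩
      have hqc : q.2 = c' := by simpa using (List.mem_filter.mp hq').2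
      have hlt : c' < c := hC.1 c' hc'
      exact (pvB_iff p q).mpr (Or.inl (by omega))

-- ---------- the per-field core lemma ----------

theorem ranked_eq (xs : List String) :
    PySem.List.sorted2 (PySem.Dict.counter xs).items (fun x => -x.2) (fun x => x.1) false
      = pvRanked xs := by
  unfold pvRanked
  simp only []
  set S := PySem.List.sorted xs (fun x => x) false with hSdef
  have hSpw : S.Pairwise (· ≤ ·) := by
    simpa using PySem.List.sorted_pairwise xs (fun x => x)
  obtain ⟨hruns, hlt⟩ := pvRuns_sorted_spec S hSpw
  have hScnt : ∀ v, List.count v S = List.count v xs := fun v =>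
    (PySem.List.sorted_perm xs (fun x => x) false).count_eq v
  have hgroups : pvRuns S
      = (PySem.Set.ofList S).map (fun v => (v, (List.count v xs : Int))) := by
    rw [hruns]
    apply List.map_congr_left
    intro v _
    rw [hScnt]
  have hgpw : (pvRuns S).Pairwise (fun p q => p.1 < q.1) := by
    rw [hgroups]
    exact List.Pairwise.map _ (by intro a b hab; simpa using hab) hlt
  have hmemS : ∀ a, a ∈ S ↔ a ∈ xs := fun a => PySem.List.mem_sorted xs (fun x => x) false a
  have hpermset : (PySem.Set.ofList S : List String).Perm (PySem.Set.ofList xs) :=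
    (List.perm_ext_iff_of_nodup (PySem.Set.nodup_ofList _) (PySem.Set.nodup_ofList _)).mpr
      (by intro a; rw [PySem.Set.mem_ofList, PySem.Set.mem_ofList]; exact hmemS a)
  have hpermitems : (pvRuns S).Perm (PySem.Dict.counter xs).items := by
    rw [hgroups, PySem.Dict.items_counter]
    exact hpermset.map _
  -- buckets
  have hkeys : ((pvRuns S).foldl (fun b p => b.modify p.2 [] (· ++ [p]))
      PySem.Dict.empty).keys = PySem.Set.ofList ((pvRuns S).map (fun p => p.2)) := by
    have hk := PySem.Dict.keys_foldl_modify_key (pvRuns S) (fun p => p.2) []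
      (fun _ p => (· ++ [p])) PySem.Dict.empty
    simpa [PySem.Dict.keys_empty, PySem.Set.update_nil_left] using hk
  set C := PySem.List.sorted ((pvRuns S).foldl (fun b p => b.modify p.2 [] (· ++ [p]))
    PySem.Dict.empty).keys (fun x => x) true with hCdef
  have hCperm : C.Perm (PySem.Set.ofList ((pvRuns S).map (fun p => p.2))) := by
    rw [hCdef, hkeys]
    exact PySem.List.sorted_perm _ _ _
  have hCnodup : C.Nodup := hCperm.nodup_iff.mpr (PySem.Set.nodup_ofList _)
  have hCgt : C.Pairwise (· > ·) := by
    have h1 : C.Pairwise (fun a b => b ≤ a) := by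
      rw [hCdef]
      simpa using PySem.List.sorted_pairwise_rev ((pvRuns S).foldl
        (fun b p => b.modify p.2 [] (· ++ [p])) PySem.Dict.empty).keys (fun x => x)
    have h2 : C.Pairwise (· ≠ ·) := hCnodup
    exact (h1.and h2).imp (fun h => lt_of_le_of_ne h.1 (fun e => h.2 e.symm))
  have hout : C.flatMap (fun c => ((pvRuns S).foldl (fun b p => b.modify p.2 [] (· ++ [p]))
      PySem.Dict.empty).getD c []) = C.flatMap (fun c => (pvRuns S).filter (fun p => p.2 == c)) := by
    apply pv_flatMap_congr
    intro c _
    rw [getD_bucket]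
    simp [PySem.Dict.getD_empty]
  have hcov : ∀ p ∈ pvRuns S, p.2 ∈ C := by
    intro p hp
    rw [hCdef, PySem.List.mem_sorted, hkeys, PySem.Set.mem_ofList]
    exact List.mem_map_of_mem hp
  have houtperm := perm_flatMap_filter C (pvRuns S) hCnodup hcov
  have houtpw := pairwise_out C (pvRuns S) hgpw hCgt
  have hApw : (PySem.List.sorted2 (PySem.Dict.counter xs).items (fun x => -x.2)
      (fun x => x.1) false).Pairwise (fun a b => pvB b a = false) := by
    rw [sorted2_eq_foldl]
    exact foldl_insertBy_pvB_pairwise _ _ (by simp)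
  have hAperm := PySem.List.sorted2_perm (PySem.Dict.counter xs).items
    (fun x => -x.2) (fun x => x.1) false
  rw [hout]
  apply pv_unique
  · exact hAperm.trans (hpermitems.symm.trans houtperm.symm)
  · exact hApw
  · exact houtpw.imp (fun h => pvB_asymm h)

-- ===== VERDICT (by name: the statement is the Claim_ definition above) =====
theorem extract_unique_values_spec : Claim_equal_extract_unique_values := by
  intro data fields _
  show extract_unique_values data fields = extract_unique_values_alt data fields
  unfold extract_unique_values extract_unique_values_alt
  refine congrArg PySem.Dict.items ?_
  apply pv_foldl_congr
  intro acc field _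
  exact congrArg (acc.insert field) (ranked_eq _)
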